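-- pv_equiv track=rewrite | github.com/ghwns82/baekjoon_ghwns | 백준/Gold/2342. Dance Dance Revolution/Dance Dance Revolution.py | min_energy
-- ===== SOURCE A (Python) =====
-- def move_cost(from_pos, to_pos):
--     if from_pos == 0:  # 중앙에서 이동
--         return 2
--     if from_pos == to_pos:  # 같은 위치를 반복
--         return 1
--     if abs(from_pos - to_pos) == 2:  # 반대편 이동
--         return 4
--     return 3  # 인접 이동
--
-- def min_energy(steps):
--     INF = float('inf')
--     dp = {}  # DP 테이블 (딕셔너리 사용하여 메모리 절약)
--
--     # 초기 상태 (두 발이 중앙에 있음)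
--     dp[(0, 0)] = 0
--
--     for step in steps:
--         next_dp = {}
--
--         for (left, right), energy in dp.items():
--             # 왼발을 움직이는 경우
--             if right != step:  # 두 발이 같은 위치로 갈 수 없음
--                 new_cost = energy + move_cost(left, step)
--                 if (step, right) not in next_dp or next_dp[(step, right)] > new_cost:
--                     next_dp[(step, right)] = new_cost
--
--             # 오른발을 움직이는 경우
--             if left != step:
--                 new_cost = energy + move_cost(right, step)
--                 if (left, step) not in next_dp or next_dp[(left, step)] > new_cost:
--                     next_dp[(left, step)] = new_cost
--
--         dp = next_dp  # 다음 단계로 업데이트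
--
--     return min(dp.values())  # 최소 힘 반환
-- ===== SOURCE B (Python) =====
-- def move_cost(from_pos, to_pos):
--     if from_pos == 0:
--         return 2
--     if from_pos == to_pos:
--         return 1
--     if abs(from_pos - to_pos) == 2:
--         return 4
--     return 3
--
-- def min_energy(steps):
--     # Backward value iteration: g[p] = minimum cost-to-go to perform the remaining
--     # steps when one foot stands on the previous step and the free foot is at p.
--     # The table is kept over the fixed candidate position set {0} | set(steps);
--     # the answer is read off at g[0] (both feet start at the centre).
--     INF = float('inf')
--     cand = {0, *steps}
--     g = {p: 0 for p in cand}          # past the last step nothing remains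
--     for s, prev in reversed(list(zip(steps, [0] + steps[:-1]))):
--         ng = {}
--         for p in cand:
--             best = INF
--             if p != s:                # the foot on `prev` takes this step
--                 best = move_cost(prev, s) + g[p]
--             if prev != s:             # the free foot takes this step
--                 c = move_cost(p, s) + g[prev]
--                 if c < best:
--                     best = c
--             ng[p] = best
--         g = ng
--     return g[0]
-- ===== Notes on version B (the rewrite author's own statement) =====
-- stated objective: alternative
-- what changed: B replaces A's forward DP over a growing dict of reachable (left,right) foot pairs accumulating cost-so-far by backward value iteration: a fixed table over the candidate position set {0} union set(steps) holding the min cost-to-go with the free foot at p (the other foot implicitly on the previous step), and the answer is read at key 0 instead of a final min over the dict.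
import Mathlib
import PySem

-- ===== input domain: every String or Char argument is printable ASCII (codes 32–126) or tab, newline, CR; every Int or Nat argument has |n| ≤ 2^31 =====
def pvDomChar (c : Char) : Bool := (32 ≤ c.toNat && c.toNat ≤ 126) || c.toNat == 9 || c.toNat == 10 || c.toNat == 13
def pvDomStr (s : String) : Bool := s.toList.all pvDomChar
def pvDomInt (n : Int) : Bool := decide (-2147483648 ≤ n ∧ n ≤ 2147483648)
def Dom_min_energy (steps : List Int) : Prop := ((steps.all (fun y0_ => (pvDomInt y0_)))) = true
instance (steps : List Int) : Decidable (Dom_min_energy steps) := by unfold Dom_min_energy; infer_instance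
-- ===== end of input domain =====

-- B replaces A's forward DP (growing dict of reachable (left,right) pairs, cost-so-far,
-- final min over the dict) by BACKWARD value iteration: a fixed table over the candidate
-- position set {0} ∪ set(steps), keyed by the free foot, holding min cost-to-go (none = inf),
-- answer read at key 0. Objective: alternative algorithm of similar cost.

-- ===== PORT A =====
def move_cost (from_pos to_pos : Int) : Int :=
  if from_pos = 0 then 2
  else if from_pos = to_pos then 1
  else if |from_pos - to_pos| = 2 then 4
  else 3

-- transliteration of A's inline 'if k not in next_dp or next_dp[k] > c: next_dp[k] = c'
def pyMinSet {κ : Type} [BEq κ] (nd : PySem.Dict κ Int) (k : κ) (c : Int) : PySem.Dict κ Int :=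
  if nd.contains k = false ∨ nd.getD k 0 > c then nd.insert k c else nd

def stepA (dp : PySem.Dict (Int × Int) Int) (step : Int) : PySem.Dict (Int × Int) Int :=
  dp.items.foldl (fun next_dp lre =>
    let left := lre.1.1
    let right := lre.1.2
    let energy := lre.2
    let next_dp := if right ≠ step then pyMinSet next_dp (step, right) (energy + move_cost left step) else next_dp
    if left ≠ step then pyMinSet next_dp (left, step) (energy + move_cost right step) else next_dp)
    PySem.Dict.empty

def min_energy (steps : List Int) : Int :=
  let dp : PySem.Dict (Int × Int) Int := (PySem.Dict.empty).insert (0, 0) 0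
  let dp := steps.foldl stepA dp
  match PySem.List.min? dp.values (fun v => v) with
  | some m => m
  | none => 0   -- Python: min() of an empty dict raises ValueError; excluded by Pre_

-- ===== PORT B =====
-- B's table values are int-or-float('inf'); none encodes inf.  'c < best' then 'best = c'
-- on int/inf values is exactly this min (ties are equal values).
def ominO (a b : Option Int) : Option Int :=
  match a, b with
  | none, b => b
  | a, none => a
  | some x, some y => some (min x y)

def stepBk (cand : List Int) (sp : Int × Int) (g : PySem.Dict Int (Option Int)) : PySem.Dict Int (Option Int) :=
  cand.foldl (fun ng p =>
    let s := sp.1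
    let prev := sp.2
    let best : Option Int := if p ≠ s then (g.getD p none).map (fun v => move_cost prev s + v) else none
    let best := if prev ≠ s then ominO ((g.getD prev none).map (fun v => move_cost p s + v)) best else best
    ng.insert p best) PySem.Dict.empty

def min_energy_alt (steps : List Int) : Int :=
  let cand := PySem.Set.ofList (0 :: steps)   -- {0, *steps}; table values don't depend on the order
  let g0 := cand.foldl (fun d p => d.insert p (some (0 : Int))) PySem.Dict.empty
  -- 'for s, prev in reversed(list(zip(steps, [0] + steps[:-1])))' = foldr over the zip
  let g := (steps.zip (0 :: steps.dropLast)).foldr (stepBk cand) g0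
  match g.getD 0 none with
  | some m => m
  | none => 0   -- Python: g[0] is float('inf') there; excluded by Pre_

-- ===== PRECONDITION & SPEC =====
-- Pre_ excludes exactly the inputs whose first step is 0: there the single initial state (0,0)
-- allows no move, A's dict stays empty forever and Python's min() raises ValueError
-- (B returns float('inf') there, not an int).
def Pre_min_energy (steps : List Int) : Prop := steps.head? ≠ some 0
instance (steps : List Int) : Decidable (Pre_min_energy steps) := by unfold Pre_min_energy; infer_instance
def pvWitness_min_energy : List Int := [1, 3, 2]

def Spec_min_energy (steps : List Int) (out : Int) : Prop := out = min_energy_alt steps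
instance (steps : List Int) (out : Int) : Decidable (Spec_min_energy steps out) := by unfold Spec_min_energy; infer_instance

-- ===== CLAIM (what is proved, stated in full; the proofs are below) =====
def Claim_equal_min_energy : Prop := ∀ (steps : List Int), Dom_min_energy steps → Pre_min_energy steps → Spec_min_energy steps (min_energy steps)

-- ===== LEMMAS AND PROOFS =====

def omin (o : Option Int) (c : Int) : Int := match o with | none => c | some v => min v c

def mins (l : List Int) : Option Int := PySem.List.min? l (fun v => v)

theorem get?_pyMinSet {κ : Type} [BEq κ] [LawfulBEq κ] [DecidableEq κ]
    (d : PySem.Dict κ Int) (k q : κ) (c : Int) :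
    (pyMinSet d k c).get? q = if q = k then some (omin (d.get? k) c) else d.get? q := by
  unfold pyMinSet
  rcases h : d.get? k with _ | v
  · have hc : d.contains k = false := by rw [PySem.Dict.contains_eq_isSome_get?, h]; rfl
    simp [hc, PySem.Dict.get?_insert, omin]
  · have hc : d.contains k = true := by rw [PySem.Dict.contains_eq_isSome_get?, h]; rfl
    have hd : d.getD k 0 = v := by rw [PySem.Dict.getD_eq_get?_getD, h]; rfl
    by_cases hvc : v > c
    · have hmin : min v c = c := by omega
      simp [hc, hd, hvc, PySem.Dict.get?_insert, omin, hmin]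
    · have hmin : min v c = v := by omega
      simp [hc, hd, hvc, omin, hmin]
      rintro rfl; exact h

theorem nodup_keys_pyMinSet {κ : Type} [BEq κ] [LawfulBEq κ]
    (d : PySem.Dict κ Int) (k : κ) (c : Int) (h : d.keys.Nodup) :
    (pyMinSet d k c).keys.Nodup := by
  unfold pyMinSet
  split
  · exact PySem.Dict.nodup_keys_insert _ _ _ h
  · exact h

theorem get?_foldl_pyMinSet {κ : Type} [BEq κ] [LawfulBEq κ] [DecidableEq κ]
    (cs : List (κ × Int)) (d : PySem.Dict κ Int) (q : κ) :
    (cs.foldl (fun nd kc => pyMinSet nd kc.1 kc.2) d).get? q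
      = ((cs.filter (fun kc => decide (kc.1 = q))).map (·.2)).foldl
          (fun o c => some (omin o c)) (d.get? q) := by
  induction cs generalizing d with
  | nil => rfl
  | cons kc t ih =>
    rw [List.foldl_cons, ih]
    by_cases hq : kc.1 = q
    · simp [hq, get?_pyMinSet]
    · simp [hq, get?_pyMinSet, Ne.symm hq]

theorem nodup_keys_foldl_pyMinSet {κ : Type} [BEq κ] [LawfulBEq κ]
    (cs : List (κ × Int)) (d : PySem.Dict κ Int) (h : d.keys.Nodup) :
    (cs.foldl (fun nd kc => pyMinSet nd kc.1 kc.2) d).keys.Nodup := by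
  induction cs generalizing d with
  | nil => exact h
  | cons kc t ih => exact ih _ (nodup_keys_pyMinSet _ _ _ h)

theorem foldl_some_omin (t : List Int) (a : Int) :
    t.foldl (fun o c => some (omin o c)) (some a) = some (t.foldl min a) := by
  induction t generalizing a with
  | nil => rfl
  | cons x t ih => simpa [omin] using ih (min a x)

theorem foldl_omin_none (l : List Int) :
    l.foldl (fun o c => some (omin o c)) none = mins l := by
  cases l with
  | nil => rfl
  | cons x t =>
    rw [List.foldl_cons, mins, PySem.List.min?_id_cons]
    exact foldl_some_omin t x

-- antisymmetric min comparison: mutual domination gives equal minima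
theorem mins_eq_of_dom (la lb : List Int)
    (hab : ∀ v ∈ la, ∃ w ∈ lb, w ≤ v) (hba : ∀ v ∈ lb, ∃ w ∈ la, w ≤ v) :
    mins la = mins lb := by
  rcases ha : mins la with _ | ma <;> rcases hb : mins lb with _ | mb
  · rfl
  · rw [mins, PySem.List.min?_eq_none_iff] at ha
    obtain ⟨w, hw, -⟩ := hba mb (PySem.List.min?_mem hb)
    simp [ha] at hw
  · rw [mins, PySem.List.min?_eq_none_iff] at hb
    obtain ⟨w, hw, -⟩ := hab ma (PySem.List.min?_mem ha)
    simp [hb] at hw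
  · obtain ⟨w, hwb, hw⟩ := hab ma (PySem.List.min?_mem ha)
    obtain ⟨u, hua, hu⟩ := hba mb (PySem.List.min?_mem hb)
    have h1 := PySem.List.min?_isMin ha u hua
    have h2 := PySem.List.min?_isMin hb w hwb
    simp only at h1 h2
    congr 1
    omega

theorem mem_filtered {κ : Type} [DecidableEq κ] (cs : List (κ × Int)) (q : κ) (v : Int) :
    (v ∈ (cs.filter (fun kc => decide (kc.1 = q))).map (·.2)) ↔ (q, v) ∈ cs := by
  simp only [List.mem_map, List.mem_filter, decide_eq_true_eq]
  constructor
  · rintro ⟨⟨k, w⟩, ⟨hm, rfl⟩, rfl⟩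
    exact hm
  · intro hm
    exact ⟨(q, v), ⟨hm, rfl⟩, rfl⟩

-- A's two conditional dict updates, as a contribution list
def contribA (s : Int) (it : (Int × Int) × Int) : List ((Int × Int) × Int) :=
  (if it.1.2 ≠ s then [((s, it.1.2), it.2 + move_cost it.1.1 s)] else []) ++
  (if it.1.1 ≠ s then [((it.1.1, s), it.2 + move_cost it.1.2 s)] else [])

theorem stepA_eq (dp : PySem.Dict (Int × Int) Int) (s : Int) :
    stepA dp s = (dp.items.flatMap (contribA s)).foldl
      (fun nd kc => pyMinSet nd kc.1 kc.2) PySem.Dict.empty := by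
  unfold stepA
  conv_rhs => rw [List.foldl_flatMap]
  apply PySem.List.foldl_congr_mem
  intro nd it _
  unfold contribA
  by_cases h1 : it.1.2 ≠ s <;> by_cases h2 : it.1.1 ≠ s <;> simp [h1, h2]

theorem nodup_keys_stepA (dp : PySem.Dict (Int × Int) Int) (s : Int) :
    (stepA dp s).keys.Nodup := by
  rw [stepA_eq]
  exact nodup_keys_foldl_pyMinSet _ _ PySem.Dict.nodup_keys_empty

-- ominO algebra
theorem ominO_none_left (b : Option Int) : ominO none b = b := rfl

theorem ominO_none_right (a : Option Int) : ominO a none = a := by cases a <;> rfl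

theorem ominO_comm (a b : Option Int) : ominO a b = ominO b a := by
  cases a <;> cases b <;> simp [ominO, min_comm]

theorem ominO_assoc (a b c : Option Int) : ominO (ominO a b) c = ominO a (ominO b c) := by
  cases a <;> cases b <;> cases c <;> simp [ominO, min_assoc]

def foldMin (L : List (Option Int)) : Option Int := L.foldl ominO none

theorem foldl_ominO_some (L : List (Option Int)) (a : Int) :
    L.foldl ominO (some a) = some ((L.filterMap id).foldl min a) := by
  induction L generalizing a with
  | nil => rfl
  | cons o t ih => cases o <;> simp [ominO, ih]

theorem foldMin_eq_mins (L : List (Option Int)) : foldMin L = mins (L.filterMap id) := by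
  induction L with
  | nil => rfl
  | cons o t ih =>
    cases o with
    | none => simpa [foldMin, ominO] using ih
    | some a =>
      simp only [foldMin, List.foldl_cons, ominO_none_left, foldl_ominO_some,
        List.filterMap_cons, id]
      rw [mins, PySem.List.min?_id_cons]

theorem foldl_ominO_from (L : List (Option Int)) (a : Option Int) :
    L.foldl ominO a = ominO a (foldMin L) := by
  induction L generalizing a with
  | nil => cases a <;> rfl
  | cons o t ih =>
    simp only [foldMin, List.foldl_cons, ominO_none_left]
    rw [ih, ih o, ominO_assoc]

theorem foldMin_append (L1 L2 : List (Option Int)) :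
    foldMin (L1 ++ L2) = ominO (foldMin L1) (foldMin L2) := by
  simp only [foldMin, List.foldl_append]
  rw [foldl_ominO_from]
  rfl

theorem foldMin_flatMap {α : Type} (L : List α) (h : α → List (Option Int)) :
    foldMin (L.flatMap h) = foldMin (L.map (fun x => foldMin (h x))) := by
  induction L with
  | nil => rfl
  | cons x t ih =>
    rw [List.flatMap_cons, foldMin_append, List.map_cons, ih]
    simp only [foldMin, List.foldl_cons, ominO_none_left]
    conv_rhs => rw [foldl_ominO_from]
    rfl

-- backward cost-to-go on foot pairs: Gp t l r = min energy to perform t from state (l, r); none = impossible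
def Gp : List Int → Int → Int → Option Int
  | [], _, _ => some 0
  | s :: t, l, r =>
      ominO (if r ≠ s then (Gp t s r).map (fun g => move_cost l s + g) else none)
            (if l ≠ s then (Gp t l s).map (fun g => move_cost r s + g) else none)

theorem Gp_symm (t : List Int) (l r : Int) : Gp t l r = Gp t r l := by
  induction t generalizing l r with
  | nil => rfl
  | cons s t ih =>
    simp only [Gp]
    rw [ih s r, ih l s, ominO_comm]

theorem map_add_ominO (a b : Option Int) (c : Int) :
    (ominO a b).map (fun g => c + g) = ominO (a.map (fun g => c + g)) (b.map (fun g => c + g)) := by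
  cases a <;> cases b <;> simp [ominO, min_add_add_left]

def valOf (t : List Int) (kv : (Int × Int) × Int) : Option Int :=
  (Gp t kv.1.1 kv.1.2).map (fun g => kv.2 + g)

theorem contrib_val (s : Int) (t : List Int) (it : (Int × Int) × Int) :
    foldMin ((contribA s it).map (valOf t)) = valOf (s :: t) it := by
  obtain ⟨⟨l, r⟩, e⟩ := it
  simp only [valOf, Gp, map_add_ominO]
  have h1 : ((if r ≠ s then (Gp t s r).map (fun g => move_cost l s + g) else none).map
      (fun g => e + g)) = (if r ≠ s then (Gp t s r).map (fun g => (e + move_cost l s) + g) else none) := by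
    split <;> cases Gp t s r <;> simp [add_assoc]
  have h2 : ((if l ≠ s then (Gp t l s).map (fun g => move_cost r s + g) else none).map
      (fun g => e + g)) = (if l ≠ s then (Gp t l s).map (fun g => (e + move_cost r s) + g) else none) := by
    split <;> cases Gp t l s <;> simp [add_assoc]
  rw [h1, h2]
  unfold contribA
  by_cases hr : r ≠ s <;> by_cases hl : l ≠ s <;>
    simp [hr, hl, foldMin, ominO_none_left, ominO_none_right, valOf]

-- grouping a min by key: min over the per-key minima table = min over all contributions
theorem foldMin_table (cs : List ((Int × Int) × Int)) (f : (Int × Int) × Int → Option Int)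
    (hf : ∀ k e e', f (k, e) = (f (k, e')).map (fun v => v + (e - e'))) :
    foldMin (((cs.foldl (fun nd kc => pyMinSet nd kc.1 kc.2) PySem.Dict.empty).items).map f)
      = foldMin (cs.map f) := by
  set nd := cs.foldl (fun nd kc => pyMinSet nd kc.1 kc.2) PySem.Dict.empty with hnd
  have hnodup : nd.keys.Nodup := nodup_keys_foldl_pyMinSet _ _ PySem.Dict.nodup_keys_empty
  have hget : ∀ k, nd.get? k
      = PySem.List.min? ((cs.filter (fun kc => decide (kc.1 = k))).map (·.2)) (fun v => v) := by
    intro k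
    rw [hnd, get?_foldl_pyMinSet, PySem.Dict.get?_empty, foldl_omin_none]
    rfl
  rw [foldMin_eq_mins, foldMin_eq_mins]
  apply mins_eq_of_dom
  · intro v hv
    simp only [List.mem_filterMap, List.mem_map, id] at hv
    obtain ⟨o, ⟨⟨k, e⟩, hmem, rfl⟩, hvo⟩ := hv
    have he : nd.get? k = some e := PySem.Dict.get?_of_mem_items _ hmem hnodup
    rw [hget k] at he
    have hein : e ∈ (cs.filter (fun kc => decide (kc.1 = k))).map (·.2) :=
      PySem.List.min?_mem he
    rw [mem_filtered] at hein
    refine ⟨v, ?_, le_refl v⟩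
    simp only [List.mem_filterMap, List.mem_map, id]
    exact ⟨f (k, e), ⟨(k, e), hein, rfl⟩, hvo⟩
  · intro v hv
    simp only [List.mem_filterMap, List.mem_map, id] at hv
    obtain ⟨o, ⟨⟨k, c⟩, hmem, rfl⟩, hvo⟩ := hv
    have hcin : c ∈ (cs.filter (fun kc => decide (kc.1 = k))).map (·.2) := by
      rw [mem_filtered]; exact hmem
    rcases hm : nd.get? k with _ | m
    · rw [hget k, PySem.List.min?_eq_none_iff] at hm
      simp [hm] at hcin
    · rw [hget k] at hm
      have hmle : m ≤ c := by
        have := PySem.List.min?_isMin hm c hcin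
        simpa using this
      rw [← hget k] at hm
      have hitems : (k, m) ∈ nd.items := PySem.Dict.mem_items_of_get?_eq_some _ hm
      have hfm := hf k m c
      rcases hfc : f (k, c) with _ | fc
      · rw [hfc] at hvo; exact absurd hvo (by simp)
      · rw [hfc] at hvo hfm
        simp only [Option.map_some] at hfm
        have hfv : fc = v := by simpa using hvo
        refine ⟨fc + (m - c), ?_, by omega⟩
        simp only [List.mem_filterMap, List.mem_map, id]
        exact ⟨f (k, m), ⟨(k, m), hitems, rfl⟩, by rw [hfm]⟩

-- exchange: running A forward from dp then taking min = min over dp of energy + cost-to-go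
theorem exchange (t : List Int) :
    ∀ (dp : PySem.Dict (Int × Int) Int), dp.keys.Nodup →
      mins ((t.foldl stepA dp).values) = foldMin (dp.items.map (valOf t)) := by
  induction t with
  | nil =>
    intro dp hnd
    rw [foldMin_eq_mins]
    have h : (dp.items.map (valOf [])).filterMap id = dp.items.map (·.2) := by
      induction dp.items with
      | nil => rfl
      | cons kv tl iht => simpa [valOf, Gp] using iht
    rw [List.foldl_nil, h]
    rfl
  | cons s t ih =>
    intro dp hnd
    rw [List.foldl_cons, ih (stepA dp s) (nodup_keys_stepA dp s)]
    have hkey : foldMin (((stepA dp s).items).map (valOf t))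
        = foldMin ((dp.items.flatMap (contribA s)).map (valOf t)) := by
      rw [stepA_eq]
      apply foldMin_table
      intro k e e'
      simp only [valOf]
      cases Gp t k.1 k.2 <;> simp <;> omega
    rw [hkey, List.map_flatMap, foldMin_flatMap]
    congr 1
    apply List.map_congr_left
    intro it _
    exact contrib_val s t it

theorem min_energy_eq_Gp (steps : List Int) :
    min_energy steps = match Gp steps 0 0 with | some m => m | none => 0 := by
  have hnd : ((PySem.Dict.empty : PySem.Dict (Int × Int) Int).insert (0, 0) 0).keys.Nodup :=
    PySem.Dict.nodup_keys_insert _ _ _ PySem.Dict.nodup_keys_empty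
  have h := exchange steps _ hnd
  have hitems : ((PySem.Dict.empty : PySem.Dict (Int × Int) Int).insert (0, 0) 0).items
      = [((0, 0), (0 : Int))] := rfl
  rw [hitems] at h
  simp only [List.map_cons, List.map_nil] at h
  have hv : foldMin [valOf steps ((0, 0), 0)] = Gp steps 0 0 := by
    simp only [foldMin, List.foldl_cons, List.foldl_nil, ominO_none_left, valOf]
    cases Gp steps 0 0 <;> simp
  rw [hv] at h
  unfold mins at h
  show (match PySem.List.min? ((steps.foldl stepA
      ((PySem.Dict.empty : PySem.Dict (Int × Int) Int).insert (0, 0) 0)).values) (fun v => v) with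
    | some m => m | none => 0) = match Gp steps 0 0 with | some m => m | none => 0
  rw [h]

-- ===== B side =====

-- collapsed cost-to-go: free foot at p, moving foot on prev
def Gc : List Int → Int → Int → Option Int
  | [], _, _ => some 0
  | s :: t, prev, p =>
      ominO (if prev ≠ s then (Gc t s prev).map (fun g => move_cost p s + g) else none)
            (if p ≠ s then (Gc t s p).map (fun g => move_cost prev s + g) else none)

theorem Gc_eq_Gp (t : List Int) (prev p : Int) : Gc t prev p = Gp t prev p := by
  induction t generalizing prev p with
  | nil => rfl
  | cons s t ih =>
    simp only [Gc, Gp]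
    rw [ih s prev, ih s p, Gp_symm t s prev, ominO_comm]

theorem get?_foldl_insertF {α : Type} (F : Int → α) :
    ∀ (l : List Int) (d : PySem.Dict Int α) (q : Int),
      (l.foldl (fun d p => d.insert p (F p)) d).get? q
        = if q ∈ l then some (F q) else d.get? q := by
  intro l
  induction l with
  | nil => simp
  | cons p l' ih =>
    intro d q
    rw [List.foldl_cons, ih]
    by_cases hq : q ∈ l'
    · simp [hq]
    · by_cases hqp : q = p
      · simp [hqp]
      · simp [hq, hqp, PySem.Dict.get?_insert]

theorem zip_dropLast (t : List Int) (p : Int) :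
    t.zip (p :: t.dropLast) = t.zip (p :: t) := by
  induction t generalizing p with
  | nil => rfl
  | cons s t' ih =>
    cases t' with
    | nil => rfl
    | cons a u =>
      show (s, p) :: ((a :: u).zip (s :: (a :: u).dropLast))
          = (s, p) :: ((a :: u).zip (s :: a :: u))
      rw [ih s]

-- invariant: the backward fold computes Gc at every candidate position
theorem B_invariant (cand : List Int) :
    ∀ (t : List Int) (p0 : Int), p0 ∈ cand → (∀ x ∈ t, x ∈ cand) →
      ∀ q ∈ cand,
        ((t.zip (p0 :: t)).foldr (stepBk cand)
            (cand.foldl (fun d p => d.insert p (some (0 : Int))) PySem.Dict.empty)).get? q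
          = some (Gc t p0 q) := by
  intro t
  induction t with
  | nil =>
    intro p0 _ _ q hq
    simp only [List.zip_nil_left, List.foldr_nil]
    rw [get?_foldl_insertF]
    simp [hq, Gc]
  | cons s t' ih =>
    intro p0 hp0 hsub q hq
    have hs : s ∈ cand := hsub s (by simp)
    have hsub' : ∀ x ∈ t', x ∈ cand := fun x hx => hsub x (by simp [hx])
    have hinner := ih s hs hsub'
    simp only [List.zip_cons_cons, List.foldr_cons]
    set T := (t'.zip (s :: t')).foldr (stepBk cand)
      (cand.foldl (fun d p => d.insert p (some (0 : Int))) PySem.Dict.empty) with hT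
    unfold stepBk
    rw [get?_foldl_insertF (fun p =>
      let best : Option Int := if p ≠ s then (T.getD p none).map (fun v => move_cost p0 s + v) else none
      if p0 ≠ s then ominO ((T.getD p0 none).map (fun v => move_cost p s + v)) best else best)]
    simp only [hq, if_pos]
    have hTq : T.getD q none = Gc t' s q := by
      rw [PySem.Dict.getD_eq_get?_getD, hinner q hq]; rfl
    have hTp0 : T.getD p0 none = Gc t' s p0 := by
      rw [PySem.Dict.getD_eq_get?_getD, hinner p0 hp0]; rfl
    simp only [hTq, hTp0, Gc]
    by_cases h1 : p0 ≠ s <;> by_cases h2 : q ≠ s <;> simp [h1, h2, ominO_comm, ominO_none_right]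

theorem min_energy_alt_eq_Gc (steps : List Int) :
    min_energy_alt steps = match Gc steps 0 0 with | some m => m | none => 0 := by
  unfold min_energy_alt
  have h0 : (0 : Int) ∈ PySem.Set.ofList (0 :: steps) := by
    rw [PySem.Set.mem_ofList]; simp
  have hsub : ∀ x ∈ steps, x ∈ PySem.Set.ofList (0 :: steps) := by
    intro x hx
    rw [PySem.Set.mem_ofList]; simp [hx]
  have h := B_invariant (PySem.Set.ofList (0 :: steps)) steps 0 h0 hsub 0 h0
  rw [zip_dropLast] at *
  dsimp only
  rw [PySem.Dict.getD_eq_get?_getD, h]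
  rfl

theorem main_equal (steps : List Int) : min_energy steps = min_energy_alt steps := by
  rw [min_energy_eq_Gp, min_energy_alt_eq_Gc, Gc_eq_Gp]

-- ===== VERDICT (by name: the statement is the Claim_ definition above) =====
theorem min_energy_spec : Claim_equal_min_energy := by
  intro steps _ _
  unfold Spec_min_energy
  exact main_equal steps
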